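-- pv_equiv track=rewrite | github.com/alexspetty/nfield | tools/fast_collision.py | collision_all_fft
-- ===== SOURCE A (Python) =====
-- def gcd(a, b):
--     while b:
--         a, b = b, a % b
--     return a
--
-- def collision_all_fft(n, base=10):
--     """Compute C(g) for all g using FFT-like approach.
--
--     d(r) = floor(b*r/n) for r in 1..n-1.
--     C(g) = #{r : d(r) == d(g*r mod n)}.
--
--     This is the multiplicative autocorrelation of d.
--     We can compute it via additive convolution on (Z/nZ)*.
--
--     For each digit value v, define indicator I_v(r) = 1 if d(r)=v.
--     Then C(g) = sum_v sum_r I_v(r) * I_v(g*r mod n)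
--              = sum_v (I_v * I_v)(g)  [multiplicative convolution]
--
--     Via DFT on (Z/nZ)*, this becomes:
--     C_hat(chi) = sum_v |I_v_hat(chi)|^2
--
--     Then C(g) = (1/phi(n)) sum_chi C_hat(chi) * chi(g)
--
--     But computing DFT on (Z/nZ)* is O(phi(n)^2) naively.
--     With number-theoretic transform tricks, maybe O(n log n).
--
--     For now, let's use the direct brute approach for all g
--     but with the digit array precomputed.
--     """
--     # Precompute digit function
--     digit = [0] * n
--     for r in range(1, n):
--         digit[r] = (base * r) // n
--
--     # Compute C(g) for all g coprime to n
--     cg = {}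
--     for g in range(1, n):
--         if gcd(g, n) != 1:
--             continue
--         count = 0
--         for r in range(1, n):
--             gr = (g * r) % n
--             if gr == 0:
--                 continue
--             if digit[r] == digit[gr]:
--                 count += 1
--         cg[g] = count
--     return cg
-- ===== SOURCE B (Python) =====
-- def gcd2(a, b):
--     while b:
--         a, b = b, a % b
--     return a
--
-- def collision_all_fft(n, base=10):
--     # Divisor decomposition: every r in [1,n) is r = (n//m)*u with m = n//gcd(r,n) > 1
--     # and u a unit mod m; digit and the collision test factor through modulus m, so
--     # C(g) = sum over divisors m>1 of n of the unit-only collision count of g mod m.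
--     divs = [m for m in range(2, n + 1) if n % m == 0]
--     tabs = []
--     for m in divs:
--         D = [(base * x) // m for x in range(m)]
--         units = [u for u in range(1, m) if gcd2(u, m) == 1]
--         t = [sum(1 for u in units if D[u] == D[h * u % m]) if gcd2(h, m) == 1 else 0
--              for h in range(m)]
--         tabs.append((m, t))
--     return {g: sum(t[g % m] for m, t in tabs) for g in range(1, n) if gcd2(g, n) == 1}
-- ===== Notes on version B (the rewrite author's own statement) =====
-- stated objective: alternative
-- what changed: B replaces A's double loop over all g and all r by a divisor decomposition: every r in [1,n) factors uniquely as (n/m)*u with m = n/gcd(r,n) and u a unit mod m, and the digit test only depends on u mod m, so B precomputes one unit-only collision table per divisor m>1 of n and answers each coprime g as the sum of table lookups at g mod m.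
import Mathlib
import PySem

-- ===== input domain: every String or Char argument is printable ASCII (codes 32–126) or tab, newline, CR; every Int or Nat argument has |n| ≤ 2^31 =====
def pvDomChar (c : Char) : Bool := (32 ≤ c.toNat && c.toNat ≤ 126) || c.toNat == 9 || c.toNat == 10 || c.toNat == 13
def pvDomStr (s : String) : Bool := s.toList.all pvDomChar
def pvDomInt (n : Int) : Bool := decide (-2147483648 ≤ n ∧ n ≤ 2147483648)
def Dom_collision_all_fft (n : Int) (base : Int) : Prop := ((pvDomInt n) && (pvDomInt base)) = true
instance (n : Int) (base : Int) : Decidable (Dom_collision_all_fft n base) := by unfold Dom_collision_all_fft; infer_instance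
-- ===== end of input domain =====

-- B replaces A's double loop (every coprime g against every r in [1,n)) by a divisor
-- decomposition: r = (n/m)*u with m = n/gcd(r,n) and u a unit mod m, the digit test factors
-- through modulus m, so B builds one unit-only collision table per divisor m>1 of n and
-- answers each g as a sum of table lookups at g mod m; objective: alternative.

-- ===== PORT A =====

-- A's `gcd` (while b: a, b = b, a % b; return a); Python `%` is PySem.Int.mod.
def pyGcdA (a b : Int) : Int :=
  if b = 0 then a else pyGcdA b (PySem.Int.mod a b)
termination_by b.natAbs
decreasing_by
  rename_i hb
  rcases lt_or_gt_of_ne hb with h | h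
  · have := PySem.Int.mod_neg_bounds (a := a) h; omega
  · have h1 := PySem.Int.mod_nonneg a h
    have h2 := PySem.Int.mod_lt a h
    omega

-- digit is only indexed at 1 ≤ r < n and 0 ≤ gr < n, where Python never raises, so
-- `.set r.toNat` / `pyGetD _ _ 0` are exact there.
def collision_all_fft (n : Int) (base : Int) : List (Int × Int) :=
  let digit0 : List Int := List.replicate n.toNat 0       -- [0] * n  ([] for n ≤ 0)
  let digit := (PySem.List.pyRange 1 n).foldl
      (fun d r => d.set r.toNat (PySem.Int.floordiv (base * r) n)) digit0
  let cg := (PySem.List.pyRange 1 n).foldl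
      (fun (cg : PySem.Dict Int Int) g =>
        if pyGcdA g n ≠ 1 then cg
        else
          let count := (PySem.List.pyRange 1 n).foldl
            (fun (c : Int) r =>
              let gr := PySem.Int.mod (g * r) n
              if gr = 0 then c
              else if PySem.List.pyGetD digit r 0 = PySem.List.pyGetD digit gr 0 then c + 1
              else c) 0
          cg.insert g count)
      (PySem.Dict.mk [])
  cg.items

-- ===== PORT B =====

-- B's `gcd2` (same while loop as A's helper).
def pyGcdB (a b : Int) : Int :=
  if b = 0 then a else pyGcdB b (PySem.Int.mod a b)
termination_by b.natAbs
decreasing_by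
  rename_i hb
  rcases lt_or_gt_of_ne hb with h | h
  · have := PySem.Int.mod_neg_bounds (a := a) h; omega
  · have h1 := PySem.Int.mod_nonneg a h
    have h2 := PySem.Int.mod_lt a h
    omega

-- `sum(1 for u in units if p(u))` is a count, ported as countP; list indexing is at
-- indices proven in range (0 ≤ g%m < m, u < m ≤ len), so pyGetD _ _ 0 is exact.
def collision_all_fft_alt (n : Int) (base : Int) : List (Int × Int) :=
  let divs := (PySem.List.pyRange 2 (n+1)).filter (fun m => PySem.Int.mod n m == 0)
  let tabs := divs.foldl
      (fun (ts : List (Int × List Int)) m =>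
        let D := (PySem.List.pyRange 0 m).map (fun x => PySem.Int.floordiv (base * x) m)
        let units := (PySem.List.pyRange 1 m).filter (fun u => pyGcdB u m == 1)
        let t := (PySem.List.pyRange 0 m).map (fun h =>
          if pyGcdB h m == 1 then
            (units.countP (fun u =>
              PySem.List.pyGetD D u 0 == PySem.List.pyGetD D (PySem.Int.mod (h * u) m) 0) : Int)
          else 0)
        ts ++ [(m, t)]) []
  (((PySem.List.pyRange 1 n).filter (fun g => pyGcdB g n == 1)).foldl
     (fun (d : PySem.Dict Int Int) g =>
        d.insert g ((tabs.map
          (fun mt => PySem.List.pyGetD mt.2 (PySem.Int.mod g mt.1) 0)).sum))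
     (PySem.Dict.mk [])).items

-- ===== PRECONDITION & SPEC =====
def Spec_collision_all_fft (n : Int) (base : Int) (out : List (Int × Int)) : Prop := out = collision_all_fft_alt n base
instance (n : Int) (base : Int) (out : List (Int × Int)) : Decidable (Spec_collision_all_fft n base out) := by unfold Spec_collision_all_fft; infer_instance

-- ===== CLAIM (what is proved, stated in full; the proofs are below) =====
def Claim_equal_collision_all_fft : Prop := ∀ (n : Int) (base : Int), Dom_collision_all_fft n base → Spec_collision_all_fft n base (collision_all_fft n base)

-- ===== LEMMAS AND PROOFS =====

-- the two gcd helpers are the same Lean recursion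
theorem pyGcdB_eq_pyGcdA (a b : Int) : pyGcdB a b = pyGcdA a b := by
  induction a, b using pyGcdA.induct with
  | case1 a => rw [pyGcdA, pyGcdB]; simp
  | case2 a b h ih => rw [pyGcdA, pyGcdB]; simp [h, ih]

theorem gcd_emod (a b : Int) : Int.gcd b (a % b) = Int.gcd a b := by
  rw [Int.emod_def, Int.gcd_comm, mul_comm]
  exact Int.gcd_sub_mul_right_left b a (a / b)

-- pyGcdA computes Int.gcd on nonnegative arguments
theorem pyGcdA_eq_gcd (a b : Int) (ha : 0 ≤ a) (hb : 0 ≤ b) :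
    pyGcdA a b = (Int.gcd a b : Int) := by
  induction a, b using pyGcdA.induct with
  | case1 a => rw [pyGcdA, if_pos rfl, Int.gcd_zero_right]; omega
  | case2 a b h ih =>
    have hbpos : 0 < b := lt_of_le_of_ne hb (Ne.symm h)
    rw [pyGcdA, if_neg h]
    rw [PySem.Int.mod_eq_emod_of_pos hbpos] at ih ⊢
    rw [ih hb (Int.emod_nonneg a (ne_of_gt hbpos)), gcd_emod]

-- the digit value:  d_m(x) = (base*x) // m
def dgt (base m x : Int) : Int := PySem.Int.floordiv (base * x) m

-- A's digit table (replicate + per-index set) equals the mapped table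
theorem digit_aux (n base : Int) (_hn : 1 ≤ n) :
    ∀ (m : Nat), 1 ≤ m → m ≤ n.toNat →
    (PySem.List.pyRange 1 (m : Int)).foldl
      (fun d r => d.set r.toNat (PySem.Int.floordiv (base * r) n))
      (List.replicate n.toNat 0)
    = (PySem.List.pyRange 0 (m : Int)).map (fun r => PySem.Int.floordiv (base * r) n)
      ++ List.replicate (n.toNat - m) 0 := by
  intro m
  induction m with
  | zero => omega
  | succ m ih =>
    intro _ hle
    by_cases hm : m = 0
    · subst hm
      have e : ((0+1 : Nat) : Int) = 1 := by norm_num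
      rw [e]
      have h1 : PySem.List.pyRange 1 1 = [] := by decide
      have h2 : PySem.List.pyRange 0 1 = [0] := by decide
      rw [h1, h2]
      simp only [List.foldl_nil, List.map_cons, List.map_nil]
      have hf0 : PySem.Int.floordiv (base * 0) n = 0 := by
        simp [PySem.Int.floordiv]
      rw [hf0]
      have : n.toNat = 1 + (n.toNat - 1) := by omega
      rw [this, List.replicate_add]
      simp
    · have hm1 : 1 ≤ m := by omega
      have hmn : m ≤ n.toNat := by omega
      have hcast : ((m+1 : Nat) : Int) = (m : Int) + 1 := by push_cast; ring
      rw [hcast, PySem.List.pyRange_one_succ_right (by exact_mod_cast hm1),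
          PySem.List.pyRange_one_succ_right (by positivity)]
      rw [List.foldl_append, List.map_append, ih hm1 hmn]
      have hlen : ((PySem.List.pyRange 0 (m : Int)).map
          (fun r => PySem.Int.floordiv (base * r) n)).length = m := by
        rw [PySem.List.pyRange_zero_natCast]
        simp
      simp only [List.foldl_cons, List.foldl_nil]
      rw [List.set_append]
      simp only [hlen]
      have htn : ((m : Int)).toNat = m := by omega
      rw [htn]
      simp only [lt_irrefl, if_false, Nat.sub_self]
      have hrep : List.replicate (n.toNat - m) (0:Int)
          = 0 :: List.replicate (n.toNat - (m+1)) 0 := by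
        have : n.toNat - m = (n.toNat - (m+1)) + 1 := by omega
        rw [this, List.replicate_succ]
      rw [hrep]
      simp [List.append_assoc]

theorem digit_eq (n base : Int) (hn : 1 ≤ n) :
    (PySem.List.pyRange 1 n).foldl
      (fun d r => d.set r.toNat (PySem.Int.floordiv (base * r) n))
      (List.replicate n.toNat 0)
    = (PySem.List.pyRange 0 n).map (fun r => PySem.Int.floordiv (base * r) n) := by
  have hc : ((n.toNat : Nat) : Int) = n := by omega
  have := digit_aux n base hn n.toNat (by omega) le_rfl
  rw [hc] at this
  rw [this, Nat.sub_self]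
  simp

-- bridge: a mapped sum over a pyRange is a Finset.range sum
theorem sum_map_pyRange (a b : Int) (hab : a ≤ b) (G : Int → Int) :
    ((PySem.List.pyRange a b).map G).sum
    = ∑ i ∈ Finset.range (b - a).toNat, G (a + (i : Int)) := by
  obtain ⟨k, rfl⟩ : ∃ k : ℕ, b = a + (k : Int) := ⟨(b - a).toNat, by omega⟩
  have hk : (a + (k : Int) - a).toNat = k := by omega
  rw [hk, PySem.List.pyRange_one, List.map_map, hk]
  induction k with
  | zero => simp
  | succ k ih =>
    rw [List.range_succ, Finset.sum_range_succ, List.map_append]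
    simp [ih]

theorem countP_pyRange (a b : Int) (hab : a ≤ b) (p : Int → Bool) :
    (((PySem.List.pyRange a b).countP p : ℕ) : Int)
    = ∑ i ∈ Finset.range (b - a).toNat, (if p (a + (i : Int)) then (1:Int) else 0) := by
  rw [← PySem.List.sum_map_ite_one_zero, sum_map_pyRange a b hab]

theorem sum_map_filter {α : Type} (l : List α) (q : α → Bool) (F : α → Int) :
    ((l.filter q).map F).sum = (l.map (fun x => if q x then F x else 0)).sum := by
  induction l with
  | nil => simp
  | cons x l ih => by_cases h : q x <;> simp [h, ih]

-- the Nat-level divisor partition of [1, N):  r = (N/m)*u, m = N/gcd(r,N), u a unit mod m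
theorem core_partition (N : Nat) (f : Nat → Int) :
    ∑ r ∈ Finset.Ico 1 N, f r
    = ∑ m ∈ (Finset.Ico 2 (N+1)).filter (· ∣ N),
        ∑ u ∈ (Finset.Ico 1 m).filter (fun u => Nat.gcd u m = 1), f (N / m * u) := by
  rw [← Finset.sum_sigma ((Finset.Ico 2 (N+1)).filter (· ∣ N))
        (fun m => (Finset.Ico 1 m).filter (fun u => Nat.gcd u m = 1))
        (fun p => f (N / p.1 * p.2))]
  refine Finset.sum_nbij' (i := fun r => ⟨N / Nat.gcd r N, r / Nat.gcd r N⟩)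
    (j := fun p => N / p.1 * p.2) ?_ ?_ ?_ ?_ ?_
  · intro r hr
    rw [Finset.mem_Ico] at hr
    obtain ⟨hr1, hr2⟩ := hr
    have hg0 : 0 < Nat.gcd r N := Nat.gcd_pos_of_pos_left _ (by omega)
    have hgr : Nat.gcd r N ∣ r := Nat.gcd_dvd_left r N
    have hgN : Nat.gcd r N ∣ N := Nat.gcd_dvd_right r N
    have hgle : Nat.gcd r N ≤ r := Nat.le_of_dvd (by omega) hgr
    have hmN : N / Nat.gcd r N ∣ N := Nat.div_dvd_of_dvd hgN
    have hNe : Nat.gcd r N * (N / Nat.gcd r N) = N := Nat.mul_div_cancel' hgN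
    have hre : Nat.gcd r N * (r / Nat.gcd r N) = r := Nat.mul_div_cancel' hgr
    have hm2 : 2 ≤ N / Nat.gcd r N := by
      have h1 : 1 ≤ N / Nat.gcd r N := Nat.div_pos (by omega) hg0
      have hne1 : N / Nat.gcd r N ≠ 1 := by
        intro h; rw [h, mul_one] at hNe; omega
      omega
    have hmle : N / Nat.gcd r N ≤ N := Nat.le_of_dvd (by omega) hmN
    have hu1 : 1 ≤ r / Nat.gcd r N := Nat.div_pos hgle hg0
    have hum : r / Nat.gcd r N < N / Nat.gcd r N := by
      have h' : Nat.gcd r N * (r / Nat.gcd r N) < Nat.gcd r N * (N / Nat.gcd r N) := by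
        rw [hre, hNe]; exact hr2
      exact Nat.lt_of_mul_lt_mul_left h'
    refine Finset.mem_sigma.mpr ⟨?_, ?_⟩
    · rw [Finset.mem_filter, Finset.mem_Ico]; exact ⟨⟨hm2, Nat.lt_succ_of_le hmle⟩, hmN⟩
    · rw [Finset.mem_filter, Finset.mem_Ico]
      exact ⟨⟨hu1, hum⟩, Nat.coprime_div_gcd_div_gcd hg0⟩
  · intro p hp
    obtain ⟨m, u⟩ := p
    rw [Finset.mem_sigma, Finset.mem_filter, Finset.mem_filter, Finset.mem_Ico, Finset.mem_Ico] at hp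
    obtain ⟨⟨⟨hm2, hmN1⟩, hmN⟩, ⟨hu1, hum⟩, hcop⟩ := hp
    simp only at *
    have hc0 : 0 < N / m := Nat.div_pos (by omega) (by omega)
    have hcm : N / m * m = N := Nat.div_mul_cancel hmN
    rw [Finset.mem_Ico]
    constructor
    · exact Nat.mul_pos hc0 (by omega)
    · calc N / m * u < N / m * m := mul_lt_mul_of_pos_left hum hc0
        _ = N := hcm
  · intro r hr
    rw [Finset.mem_Ico] at hr
    have hgr : Nat.gcd r N ∣ r := Nat.gcd_dvd_left r N
    have hgN : Nat.gcd r N ∣ N := Nat.gcd_dvd_right r N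
    simp only
    rw [Nat.div_div_self hgN (by omega), Nat.mul_div_cancel' hgr]
  · intro p hp
    obtain ⟨m, u⟩ := p
    rw [Finset.mem_sigma, Finset.mem_filter, Finset.mem_filter, Finset.mem_Ico, Finset.mem_Ico] at hp
    obtain ⟨⟨⟨hm2, hmN1⟩, hmN⟩, ⟨hu1, hum⟩, hcop⟩ := hp
    simp only at *
    have hN0 : N ≠ 0 := by omega
    have hc0 : 0 < N / m := Nat.div_pos (by omega) (by omega)
    set c := N / m with hc
    have hcm : c * m = N := Nat.div_mul_cancel hmN
    have hgcd : Nat.gcd (c * u) N = c := by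
      rw [← hcm, Nat.gcd_mul_left, hcop, mul_one]
    have h1 : N / Nat.gcd (c * u) N = m := by
      rw [hgcd, hc, Nat.div_div_self hmN hN0]
    have h2 : c * u / Nat.gcd (c * u) N = u := by
      rw [hgcd, Nat.mul_div_cancel_left _ (by omega)]
    simp only [Sigma.mk.injEq, heq_eq_eq]
    exact ⟨h1, h2⟩
  · intro r hr
    rw [Finset.mem_Ico] at hr
    have hgr : Nat.gcd r N ∣ r := Nat.gcd_dvd_left r N
    have hgN : Nat.gcd r N ∣ N := Nat.gcd_dvd_right r N
    simp only
    rw [Nat.div_div_self hgN (by omega), Nat.mul_div_cancel' hgr]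

-- cancellation of a common positive factor in the digit value and in the modulus
theorem dgt_cancel (base c m x : Int) (hc : 0 < c) (hm : 0 < m) :
    dgt base (c * m) (c * x) = dgt base m x := by
  unfold dgt
  rw [PySem.Int.floordiv_eq_ediv_of_pos (by positivity), PySem.Int.floordiv_eq_ediv_of_pos hm]
  rw [show base * (c * x) = c * (base * x) by ring]
  exact Int.mul_ediv_mul_of_pos _ _ hc

theorem mod_cancel (c m x : Int) (hc : 0 < c) (hm : 0 < m) :
    PySem.Int.mod (c * x) (c * m) = c * PySem.Int.mod x m := by
  rw [PySem.Int.mod_eq_emod_of_pos (by positivity), PySem.Int.mod_eq_emod_of_pos hm]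
  rw [Int.emod_def, Int.emod_def, Int.mul_ediv_mul_of_pos _ _ hc]
  ring

-- the 0/1 indicator of a digit collision at r (for modulus n and multiplier g)
def Fdig (n base g : Int) (r : ℕ) : Int :=
  if dgt base n (r : Int) = dgt base n (PySem.Int.mod (g * (r : Int)) n) then 1 else 0

-- the collision test at (N/m)*u only depends on u mod the divisor m
theorem transfer (n base g : Int) (N m u : ℕ) (hN : n = (N : Int)) (hm2 : 2 ≤ m)
    (hmN : m ∣ N) (hN2 : 2 ≤ N) (_hu1 : 1 ≤ u) (_hum : u < m) :
    Fdig n base g (N / m * u)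
    = (if dgt base (m : Int) (u : Int)
          = dgt base (m : Int) (PySem.Int.mod (g * (u : Int)) (m : Int)) then (1:Int) else 0) := by
  have hc1 : 1 ≤ N / m := Nat.div_pos (Nat.le_of_dvd (by omega) hmN) (by omega)
  have hcm : N / m * m = N := Nat.div_mul_cancel hmN
  have hcpos : (0:Int) < ((N / m : ℕ) : Int) := by exact_mod_cast hc1
  have hmpos : (0:Int) < ((m : ℕ) : Int) := by exact_mod_cast (by omega : 0 < m)
  unfold Fdig
  rw [show ((N / m * u : ℕ) : Int) = ((N / m : ℕ) : Int) * (u : Int) from Nat.cast_mul _ _]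
  rw [show n = ((N / m : ℕ) : Int) * (m : Int) by rw [hN, ← Nat.cast_mul, hcm]]
  rw [dgt_cancel base _ _ _ hcpos hmpos]
  rw [show g * (((N / m : ℕ) : Int) * (u : Int)) = ((N / m : ℕ) : Int) * (g * (u : Int)) by ring]
  rw [mod_cancel _ _ _ hcpos hmpos]
  rw [dgt_cancel base _ _ _ hcpos hmpos]

-- A's inner loop (digit table already in mapped form) counts the collisions, as a Finset sum
theorem A_side (n base g : Int) (hn : 2 ≤ n) (hg1 : 1 ≤ g) (hg2 : g < n)
    (hco : Int.gcd g n = 1) :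
    (PySem.List.pyRange 1 n).foldl
      (fun (c : Int) r =>
        let gr := PySem.Int.mod (g * r) n
        if gr = 0 then c
        else if PySem.List.pyGetD ((PySem.List.pyRange 0 n).map (fun x => PySem.Int.floordiv (base * x) n)) r 0
              = PySem.List.pyGetD ((PySem.List.pyRange 0 n).map (fun x => PySem.Int.floordiv (base * x) n)) gr 0 then c + 1
        else c) 0
    = ∑ r ∈ Finset.Ico 1 n.toNat, Fdig n base g r := by
  have hnpos : (0:Int) < n := by omega
  have hcop : IsCoprime g n := Int.isCoprime_iff_gcd_eq_one.mpr hco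
  have hcong : ∀ (acc : Int), ∀ r ∈ PySem.List.pyRange 1 n,
      (fun (c : Int) r =>
        let gr := PySem.Int.mod (g * r) n
        if gr = 0 then c
        else if PySem.List.pyGetD ((PySem.List.pyRange 0 n).map (fun x => PySem.Int.floordiv (base * x) n)) r 0
              = PySem.List.pyGetD ((PySem.List.pyRange 0 n).map (fun x => PySem.Int.floordiv (base * x) n)) gr 0 then c + 1
        else c) acc r
      = (fun (c : Int) r =>
          if dgt base n r = dgt base n (PySem.Int.mod (g * r) n) then c + 1 else c) acc r := by
    intro acc r hr
    rw [PySem.List.mem_pyRange_one] at hr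
    obtain ⟨hr1, hr2⟩ := hr
    have hge0 : 0 ≤ PySem.Int.mod (g * r) n := PySem.Int.mod_nonneg _ hnpos
    have hglt : PySem.Int.mod (g * r) n < n := PySem.Int.mod_lt _ hnpos
    have hne : PySem.Int.mod (g * r) n ≠ 0 := by
      intro h0
      have hdvd := (PySem.Int.mod_eq_zero_iff_dvd (g * r) n).mp h0
      have hdr : n ∣ r := hcop.symm.dvd_of_dvd_mul_left hdvd
      have := Int.le_of_dvd (by omega) hdr
      omega
    simp only [if_neg hne]
    rw [PySem.List.pyGetD_map_pyRange_of_nonneg _ _ _ _ (by omega) hr2,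
        PySem.List.pyGetD_map_pyRange_of_nonneg _ _ _ _ hge0 hglt]
    rfl
  rw [PySem.List.foldl_congr_mem _ _ _ _ hcong]
  rw [PySem.List.foldl_ite_add_one
      (fun r => dgt base n r = dgt base n (PySem.Int.mod (g * r) n)), zero_add]
  rw [countP_pyRange 1 n (by omega)]
  rw [Finset.sum_Ico_eq_sum_range (fun r => Fdig n base g r) 1 n.toNat]
  have hk : (n - 1).toNat = n.toNat - 1 := by omega
  rw [hk]
  refine Finset.sum_congr rfl ?_
  intro i _
  unfold Fdig
  have hc : ((1 + i : ℕ) : Int) = 1 + (i : Int) := by push_cast; ring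
  rw [hc]
  by_cases h : dgt base n (1 + (i:Int)) = dgt base n (PySem.Int.mod (g * (1 + (i:Int))) n) <;>
    simp [h]

-- B's per-divisor table lookup is the unit-only collision count, as a Finset sum
theorem B_div (n base g : Int) (N m : ℕ) (hN : n = (N : Int)) (hN2 : 2 ≤ N)
    (hm2 : 2 ≤ m) (hmN : m ∣ N) (_hg1 : 1 ≤ g) (hco : Int.gcd g n = 1) :
    PySem.List.pyGetD
      ((PySem.List.pyRange 0 (m : Int)).map (fun h =>
        if pyGcdB h (m : Int) == 1 then
          ((((PySem.List.pyRange 1 (m : Int)).filter (fun u => pyGcdB u (m : Int) == 1)).countP (fun u =>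
            PySem.List.pyGetD ((PySem.List.pyRange 0 (m : Int)).map (fun x => PySem.Int.floordiv (base * x) (m : Int))) u 0
              == PySem.List.pyGetD ((PySem.List.pyRange 0 (m : Int)).map (fun x => PySem.Int.floordiv (base * x) (m : Int))) (PySem.Int.mod (h * u) (m : Int)) 0)) : Int)
        else 0))
      (PySem.Int.mod g (m : Int)) 0
    = ∑ u ∈ (Finset.Ico 1 m).filter (fun u => Nat.gcd u m = 1), Fdig n base g (N / m * u) := by
  have hmpos : (0:Int) < (m : Int) := by exact_mod_cast (show 0 < m by omega)
  have hh0 : 0 ≤ PySem.Int.mod g (m : Int) := PySem.Int.mod_nonneg _ hmpos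
  have hhlt : PySem.Int.mod g (m : Int) < (m : Int) := PySem.Int.mod_lt _ hmpos
  rw [PySem.List.pyGetD_map_pyRange_of_nonneg _ _ _ _ hh0 hhlt]
  have hgm : Int.gcd g (m : Int) = 1 := by
    have h1 : Int.gcd g (m : Int) ∣ Int.gcd g n := by
      refine Nat.dvd_gcd (Nat.gcd_dvd_left _ _) ?_
      refine dvd_trans (Nat.gcd_dvd_right _ _) ?_
      rw [Int.natAbs_natCast, hN, Int.natAbs_natCast]
      exact hmN
    rw [hco] at h1
    exact Nat.dvd_one.mp h1
  have hbranch : pyGcdB (PySem.Int.mod g (m : Int)) (m : Int) = 1 := by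
    rw [pyGcdB_eq_pyGcdA, pyGcdA_eq_gcd _ _ hh0 (le_of_lt hmpos)]
    have hg' : Int.gcd (PySem.Int.mod g (m : Int)) (m : Int) = 1 := by
      rw [PySem.Int.mod_eq_emod_of_pos hmpos, Int.gcd_comm, gcd_emod]
      exact hgm
    rw [hg']
    rfl
  rw [if_pos (by simp [hbranch])]
  rw [List.countP_filter]
  rw [countP_pyRange 1 (m : Int) (by omega)]
  rw [Finset.sum_filter]
  rw [Finset.sum_Ico_eq_sum_range
    (fun u => if Nat.gcd u m = 1 then Fdig n base g (N / m * u) else 0) 1 m]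
  have hk : ((m : Int) - 1).toNat = m - 1 := by omega
  rw [hk]
  refine Finset.sum_congr rfl ?_
  intro i hi
  rw [Finset.mem_range] at hi
  have hu1 : 1 ≤ 1 + i := by omega
  have hum : 1 + i < m := by omega
  have hcast : (1 + (i : Int)) = ((1 + i : ℕ) : Int) := by push_cast; ring
  rw [hcast]
  have hw0 : 0 ≤ PySem.Int.mod (g * ((1 + i : ℕ) : Int)) (m : Int) := PySem.Int.mod_nonneg _ hmpos
  have hwlt : PySem.Int.mod (g * ((1 + i : ℕ) : Int)) (m : Int) < (m : Int) := PySem.Int.mod_lt _ hmpos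
  have hmm : PySem.Int.mod (PySem.Int.mod g (m : Int) * ((1 + i : ℕ) : Int)) (m : Int)
      = PySem.Int.mod (g * ((1 + i : ℕ) : Int)) (m : Int) := by
    rw [PySem.Int.mod_eq_emod_of_pos hmpos, PySem.Int.mod_eq_emod_of_pos hmpos,
        PySem.Int.mod_eq_emod_of_pos hmpos]
    conv_rhs => rw [Int.mul_emod]
    conv_lhs => rw [Int.mul_emod]
    rw [Int.emod_emod_of_dvd _ (dvd_refl _)]
  have hgcdu : (pyGcdB ((1 + i : ℕ) : Int) (m : Int) == 1) = decide (Nat.gcd (1 + i) m = 1) := by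
    rw [pyGcdB_eq_pyGcdA, pyGcdA_eq_gcd _ _ (by positivity) (le_of_lt hmpos)]
    rw [Int.gcd_natCast_natCast]
    by_cases h : Nat.gcd (1 + i) m = 1 <;> simp [h]
  rw [hmm,
      PySem.List.pyGetD_map_pyRange_of_nonneg _ _ _ _ (by positivity) (by exact_mod_cast hum),
      PySem.List.pyGetD_map_pyRange_of_nonneg _ _ _ _ hw0 hwlt,
      hgcdu,
      transfer n base g N m (1 + i) hN hm2 hmN hN2 hu1 hum]
  by_cases hcop : Nat.gcd (1 + i) m = 1 <;> simp [hcop, dgt]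

-- main pointwise lemma: A's inner count equals B's divisor-table sum, for coprime g
theorem value_eq (n base g : Int) (hn : 2 ≤ n) (hg1 : 1 ≤ g) (hg2 : g < n)
    (hco : Int.gcd g n = 1) :
    (PySem.List.pyRange 1 n).foldl
      (fun (c : Int) r =>
        let gr := PySem.Int.mod (g * r) n
        if gr = 0 then c
        else if PySem.List.pyGetD ((PySem.List.pyRange 0 n).map (fun x => PySem.Int.floordiv (base * x) n)) r 0
              = PySem.List.pyGetD ((PySem.List.pyRange 0 n).map (fun x => PySem.Int.floordiv (base * x) n)) gr 0 then c + 1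
        else c) 0
    = ((((PySem.List.pyRange 2 (n+1)).filter (fun m => PySem.Int.mod n m == 0)).map
        (fun m => PySem.List.pyGetD
          ((PySem.List.pyRange 0 m).map (fun h =>
            if pyGcdB h m == 1 then
              ((((PySem.List.pyRange 1 m).filter (fun u => pyGcdB u m == 1)).countP (fun u =>
                PySem.List.pyGetD ((PySem.List.pyRange 0 m).map (fun x => PySem.Int.floordiv (base * x) m)) u 0
                  == PySem.List.pyGetD ((PySem.List.pyRange 0 m).map (fun x => PySem.Int.floordiv (base * x) m)) (PySem.Int.mod (h * u) m) 0)) : Int)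
            else 0))
          (PySem.Int.mod g m) 0)).sum) := by
  have hN2 : 2 ≤ n.toNat := by omega
  have hN : n = (n.toNat : Int) := by omega
  rw [A_side n base g hn hg1 hg2 hco]
  rw [core_partition n.toNat (Fdig n base g)]
  rw [sum_map_filter]
  rw [sum_map_pyRange 2 (n+1) (by omega)]
  rw [Finset.sum_filter]
  rw [Finset.sum_Ico_eq_sum_range
    (fun m => if m ∣ n.toNat then
      ∑ u ∈ (Finset.Ico 1 m).filter (fun u => Nat.gcd u m = 1), Fdig n base g (n.toNat / m * u)
      else 0) 2 (n.toNat + 1)]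
  have hk : (n + 1 - 2).toNat = n.toNat + 1 - 2 := by omega
  rw [hk]
  refine Finset.sum_congr rfl ?_
  intro i hi
  rw [Finset.mem_range] at hi
  have hmcast : (2 + (i : Int)) = ((2 + i : ℕ) : Int) := by push_cast; ring
  rw [hmcast]
  have hdvd_iff : (PySem.Int.mod n ((2 + i : ℕ) : Int) == 0) = decide ((2 + i) ∣ n.toNat) := by
    have e1 : (PySem.Int.mod n ((2 + i : ℕ) : Int) == 0)
        = decide (PySem.Int.mod n ((2 + i : ℕ) : Int) = 0) := rfl
    rw [e1]
    refine decide_eq_decide.mpr ?_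
    rw [PySem.Int.mod_eq_zero_iff_dvd]
    constructor
    · intro h; rw [hN] at h; exact_mod_cast h
    · intro h; rw [hN]; exact_mod_cast h
  rw [hdvd_iff]
  by_cases hdv : (2 + i) ∣ n.toNat
  · rw [if_pos hdv, if_pos (by simp [hdv])]
    exact (B_div n base g n.toNat (2 + i) hN hN2 (by omega) hdv hg1 hco).symm
  · rw [if_neg hdv, if_neg (by simp [hdv])]

-- A's guarded dict-building loop appends one fresh key per coprime g
theorem outerA (n : Int) (V : Int → Int) :
    ((PySem.List.pyRange 1 n).foldl
      (fun (cg : PySem.Dict Int Int) g => if pyGcdA g n ≠ 1 then cg else cg.insert g (V g))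
      (PySem.Dict.mk [])).items
    = ((PySem.List.pyRange 1 n).filter (fun g => pyGcdB g n == 1)).map (fun g => (g, V g)) := by
  rw [PySem.List.foldl_congr_mem _ _
    (fun (cg : PySem.Dict Int Int) g => if pyGcdA g n = 1 then cg.insert g (V g) else cg) _
    (by intro acc g _; by_cases h : pyGcdA g n = 1 <;> simp [h])]
  rw [PySem.List.foldl_ite_eq_foldl_filter (fun g => pyGcdA g n = 1)
    (fun (cg : PySem.Dict Int Int) g => cg.insert g (V g))]
  rw [PySem.Dict.items_foldl_insert_fresh _ (fun a => a) V (PySem.Dict.mk [])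
    (by intro a _; rfl)
    (by simpa using List.Nodup.filter _ (PySem.List.nodup_pyRange_one 1 n))]
  rw [List.filter_congr (fun g _ =>
    show (decide (pyGcdA g n = 1)) = (pyGcdB g n == 1) by rw [pyGcdB_eq_pyGcdA]; exact rfl)]
  rfl

-- B's dict comprehension over the filtered range
theorem outerB (n : Int) (W : Int → Int) :
    (((PySem.List.pyRange 1 n).filter (fun g => pyGcdB g n == 1)).foldl
      (fun (d : PySem.Dict Int Int) g => d.insert g (W g)) (PySem.Dict.mk [])).items
    = ((PySem.List.pyRange 1 n).filter (fun g => pyGcdB g n == 1)).map (fun g => (g, W g)) := by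
  rw [PySem.Dict.items_foldl_insert_fresh _ (fun a => a) W (PySem.Dict.mk [])
    (by intro a _; rfl)
    (by simpa using List.Nodup.filter _ (PySem.List.nodup_pyRange_one 1 n))]
  rfl

-- ===== VERDICT (by name: the statement is the Claim_ definition above) =====
theorem collision_all_fft_spec : Claim_equal_collision_all_fft := by
  unfold Claim_equal_collision_all_fft
  intro n base _
  unfold Spec_collision_all_fft
  by_cases hn : 2 ≤ n
  · simp only [collision_all_fft, collision_all_fft_alt]
    simp only [digit_eq n base (by omega)]
    rw [outerA n]
    rw [outerB n]
    simp only [PySem.List.foldl_append_singleton_eq_map, List.nil_append, List.map_map]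
    refine List.map_congr_left ?_
    intro g hg
    rw [List.mem_filter, PySem.List.mem_pyRange_one] at hg
    obtain ⟨⟨hg1, hg2⟩, hgc⟩ := hg
    have hco : Int.gcd g n = 1 := by
      rw [pyGcdB_eq_pyGcdA] at hgc
      have := pyGcdA_eq_gcd g n (by omega) (by omega)
      rw [this] at hgc
      exact_mod_cast (by simpa using hgc : ((Int.gcd g n : ℕ) : Int) = 1)
    have hv := value_eq n base g hn hg1 hg2 hco
    exact congrArg (fun v => (g, v)) hv
  · have h1 : n ≤ 1 := by omega
    simp only [collision_all_fft, collision_all_fft_alt]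
    simp only [PySem.List.pyRange_one_eq_nil h1]
    simp only [List.foldl_nil, List.filter_nil]
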